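-- pv_equiv track=rewrite | github.com/gapaza/combench | combench/models/gnc/GncModel.py | generate_component_failures
-- ===== SOURCE A (Python) =====
-- def generate_component_failures(component, all_components):
--     """
--     Generate all possible binary strings of length n, where n is the number of components in the system.
--
--     If a component isn't used in the design, treat it as having failed in the representation.
--     This way, a static representation can be used when evaluating reliability
--
--
--     :param component: array of indices of active components
--     :return: List of binary strings representing component failures.
--     """
--     n = len(component)
--     failure_options = enumerate_binary_strings(n)
--     failure_options = [[int(bit) for bit in binary_string] for binary_string in failure_options]
--     failures = []
--     for idx, bs in enumerate(failure_options):
--         fragment = [0] * len(all_components)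
--         for i, c in enumerate(component):
--             fragment[c] = bs[i]
--         failures.append(fragment)
--     return failures
--
-- def enumerate_binary_strings(n):
--     """
--         Generate all binary strings of length n.
--
--         :param n: Length of the binary strings.
--         :return: List of binary strings of length n.
--         """
--     if n < 1:
--         return []
--
--     result = []
--
--     def backtrack(current):
--         if len(current) == n:
--             result.append(current)
--             return
--         backtrack(current + '0')
--         backtrack(current + '1')
--
--     backtrack('')
--     return result
-- ===== SOURCE B (Python) =====
-- def generate_component_failures(component, all_components):
--     n = len(component)
--     if n == 0:
--         return []
--     result = []
--     for i in range(2 ** n):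
--         fragment = [0] * len(all_components)
--         for j, c in enumerate(component):
--             fragment[c] = i // 2 ** (n - 1 - j) % 2
--         result.append(fragment)
--     return result
-- ===== Notes on version B (the rewrite author's own statement) =====
-- stated objective: idiomatic
-- what changed: Replaces the recursive string-backtracking enumeration of binary strings plus per-character int() parsing with direct integer counting over range(2**n) and arithmetic bit extraction (i // 2**(n-1-j) % 2), producing the same MSB-first lexicographic order without building any strings.
import Mathlib
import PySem

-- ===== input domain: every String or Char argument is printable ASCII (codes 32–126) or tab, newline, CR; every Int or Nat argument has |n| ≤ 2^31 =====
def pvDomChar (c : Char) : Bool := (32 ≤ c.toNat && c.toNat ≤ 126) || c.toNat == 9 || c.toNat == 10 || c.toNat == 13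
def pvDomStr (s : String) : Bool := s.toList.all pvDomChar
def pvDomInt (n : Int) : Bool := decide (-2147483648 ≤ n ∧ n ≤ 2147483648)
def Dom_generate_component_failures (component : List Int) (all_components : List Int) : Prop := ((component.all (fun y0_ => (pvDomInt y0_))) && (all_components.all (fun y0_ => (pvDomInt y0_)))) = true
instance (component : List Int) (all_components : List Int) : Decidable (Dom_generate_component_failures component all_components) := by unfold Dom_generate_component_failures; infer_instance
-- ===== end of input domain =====

-- B replaces A's recursive string backtracking + int() parsing by counting i over range(2**n)
-- and extracting bits arithmetically (i // 2**(n-1-j) % 2); same order, no strings built.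

-- ===== PORT A =====
-- int(bit) for bit a character of a binary string; never raises here since bit ∈ {'0','1'}
def pvCharInt (bit : Char) : Int := (PySem.Int.ofStr? (String.ofList [bit])).getD 0

-- Python's inner backtrack(current); it terminates because n - len(current) shrinks,
-- so it is transcribed as structural recursion on that remaining length k.
def pvBacktrack : Nat → List Char → List (List Char)
  | 0, current => [current]
  | k+1, current => pvBacktrack k (current ++ ['0']) ++ pvBacktrack k (current ++ ['1'])

def enumerate_binary_strings (n : Nat) : List (List Char) :=
  if n < 1 then [] else pvBacktrack n []

def generate_component_failures (component : List Int) (all_components : List Int) : List (List Int) :=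
  let n := component.length
  let failure_options := enumerate_binary_strings n
  let failure_options2 := failure_options.map (fun binary_string => binary_string.map pvCharInt)
  (PySem.List.enumerate failure_options2 0).foldl (fun failures ib =>
    -- fragment[c] = bs[i]; bs[i] never raises (len bs = n); fragment[c] = pySetD, exact under Pre_
    let fragment := (PySem.List.enumerate component 0).foldl
      (fun frag ic => PySem.List.pySetD frag ic.2 ((PySem.List.pyGet? ib.2 ic.1).getD 0))
      (PySem.List.pyRepeat [(0:Int)] (all_components.length : Int))
    failures ++ [fragment]) []

-- ===== PORT B =====
def generate_component_failures_alt (component : List Int) (all_components : List Int) : List (List Int) :=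
  let n := component.length
  if n = 0 then [] else
  (PySem.List.pyRange 0 ((2:Int)^n) 1).foldl (fun result i =>
    -- n - 1 - j is ≥ 0 for every j produced by enumerate, so .toNat is exact
    let fragment := (PySem.List.enumerate component 0).foldl
      (fun frag jc => PySem.List.pySetD frag jc.2
        (PySem.Int.mod (PySem.Int.floordiv i ((2:Int) ^ ((n : Int) - 1 - jc.1).toNat)) 2))
      (PySem.List.pyRepeat [(0:Int)] (all_components.length : Int))
    result ++ [fragment]) []

-- ===== PRECONDITION & SPEC =====
-- Pre_ excludes exactly the inputs where Python A raises IndexError: some index c in component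
-- outside the valid (negative-wrapping) index range of all_components (B raises there too).
def Pre_generate_component_failures (component : List Int) (all_components : List Int) : Prop :=
  ∀ c ∈ component, PySem.Raise.InRange all_components.length c
instance (component : List Int) (all_components : List Int) : Decidable (Pre_generate_component_failures component all_components) := by unfold Pre_generate_component_failures; infer_instance

def pvWitness_generate_component_failures : List Int × List Int := ([0, 2], [7, 8, 9])

def Spec_generate_component_failures (component : List Int) (all_components : List Int) (out : List (List Int)) : Prop := out = generate_component_failures_alt component all_components
instance (component : List Int) (all_components : List Int) (out : List (List Int)) : Decidable (Spec_generate_component_failures component all_components out) := by unfold Spec_generate_component_failures; infer_instance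

-- ===== CLAIM (what is proved, stated in full; the proofs are below) =====
def Claim_equal_generate_component_failures : Prop := ∀ (component : List Int) (all_components : List Int), Dom_generate_component_failures component all_components → Pre_generate_component_failures component all_components → Spec_generate_component_failures component all_components (generate_component_failures component all_components)

-- ===== LEMMAS AND PROOFS =====

-- all binary strings of length k, lexicographic (what backtrack enumerates)
def pvAllBitsC : Nat → List (List Char)
  | 0 => [[]]
  | k+1 => (pvAllBitsC k).map ('0' :: ·) ++ (pvAllBitsC k).map ('1' :: ·)

-- same, as int lists
def pvAllBits : Nat → List (List Int)
  | 0 => [[]]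
  | k+1 => (pvAllBits k).map ((0:Int) :: ·) ++ (pvAllBits k).map ((1:Int) :: ·)

-- MSB-first bits of i, length n
def pvNatBits : Nat → Nat → List Int
  | 0, _ => []
  | k+1, i => ((i / 2^k : Nat) : Int) :: pvNatBits k (i % 2^k)

theorem pvBacktrack_eq (k : Nat) : ∀ cur, pvBacktrack k cur = (pvAllBitsC k).map (cur ++ ·) := by
  induction k with
  | zero => intro cur; simp [pvBacktrack, pvAllBitsC]
  | succ k ih =>
    intro cur
    simp [pvBacktrack, pvAllBitsC, ih, List.map_map, Function.comp_def]

theorem pvAllBitsC_int (k : Nat) : (pvAllBitsC k).map (List.map pvCharInt) = pvAllBits k := by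
  induction k with
  | zero => simp [pvAllBitsC, pvAllBits]
  | succ k ih =>
    have h0 : pvCharInt '0' = 0 := by decide
    have h1 : pvCharInt '1' = 1 := by decide
    simp [pvAllBitsC, pvAllBits, ← ih, List.map_map, Function.comp_def, h0, h1]

theorem pvAllBits_eq (k : Nat) : pvAllBits k = (List.range (2^k)).map (pvNatBits k) := by
  induction k with
  | zero => simp [pvAllBits, pvNatBits]
  | succ k ih =>
    have hsplit : (2:Nat)^(k+1) = 2^k + 2^k := by ring
    rw [pvAllBits, ih, hsplit, List.range_add]
    simp only [List.map_append, List.map_map]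
    congr 1
    · apply List.map_congr_left
      intro i hi
      have hi' := List.mem_range.mp hi
      simp only [Function.comp_def, pvNatBits]
      rw [Nat.div_eq_of_lt hi', Nat.mod_eq_of_lt hi']
      norm_num
    · apply List.map_congr_left
      intro i hi
      have hi' := List.mem_range.mp hi
      have hp : 0 < (2:Nat)^k := Nat.two_pow_pos k
      have hd : (2^k + i) / 2^k = 1 := by
        rw [Nat.add_comm, Nat.add_div_right _ hp, Nat.div_eq_of_lt hi']
      have hm : (2^k + i) % 2^k = i := by
        rw [Nat.add_comm, Nat.add_mod_right, Nat.mod_eq_of_lt hi']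
      simp only [Function.comp_def, pvNatBits]
      rw [hd, hm]
      norm_num

theorem pvNatBits_length (n i : Nat) : (pvNatBits n i).length = n := by
  induction n generalizing i with
  | zero => rfl
  | succ k ih => simp [pvNatBits, ih]

theorem pvNatBits_getElem (n : Nat) : ∀ (i j : Nat) (hj : j < n) (_ : i < 2^n),
    (pvNatBits n i)[j]'(by rw [pvNatBits_length]; omega) = ((i / 2^(n-1-j) % 2 : Nat) : Int) := by
  induction n with
  | zero => omega
  | succ k ih =>
    intro i j hj hi
    cases j with
    | zero =>
      have hlt : i / 2^k < 2 := Nat.div_lt_of_lt_mul (by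
        calc i < 2^(k+1) := hi
        _ = 2^k * 2 := by ring)
      simp [pvNatBits, Nat.mod_eq_of_lt hlt]
    | succ j =>
      have hj' : j < k := by omega
      have hp : 0 < (2:Nat)^k := Nat.two_pow_pos k
      have hi' : i % 2^k < 2^k := Nat.mod_lt _ hp
      have := ih (i % 2^k) j hj' hi'
      simp only [pvNatBits, List.getElem_cons_succ]
      rw [this]
      have hk1 : (k+1) - 1 - (j+1) = k - 1 - j := by omega
      rw [hk1]
      set m := k - 1 - j with hmdef
      obtain ⟨t, ht⟩ : ∃ t, k = m + (t+1) := ⟨k - m - 1, by omega⟩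
      have h2k : (2:Nat)^k = 2^m * 2^(t+1) := by rw [ht, pow_add]
      congr 1
      rw [h2k, Nat.mod_mul_right_div_self, Nat.mod_mod_of_dvd _ (dvd_pow_self 2 (Nat.succ_ne_zero t))]

-- appending g(x) for (idx, x) in enumerate(xs) builds xs.map g (index unused)
theorem pvFoldEnum {α β : Type} (g : α → β) (xs : List α) : ∀ (s : Int) (init : List β),
    (PySem.List.enumerate xs s).foldl (fun acc p => acc ++ [g p.2]) init = init ++ xs.map g := by
  induction xs with
  | nil => intro s init; simp [PySem.List.enumerate_nil]
  | cons x t ih => intro s init; rw [PySem.List.enumerate_cons]; simp [List.foldl_cons, ih]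

-- ===== VERDICT (by name: the statement is the Claim_ definition above) =====
theorem generate_component_failures_spec : Claim_equal_generate_component_failures := by
  intro component all_components _dom _pre
  unfold Spec_generate_component_failures
  simp only [generate_component_failures, generate_component_failures_alt]
  rw [pvFoldEnum (fun bs => (PySem.List.enumerate component 0).foldl (fun frag ic => PySem.List.pySetD frag ic.2 ((PySem.List.pyGet? bs ic.1).getD 0)) (PySem.List.pyRepeat [(0:Int)] (all_components.length : Int)))]
  by_cases h0 : component.length = 0
  · simp [h0, enumerate_binary_strings]
  · rw [if_neg h0]
    rw [PySem.List.foldl_append_singleton_eq_map (f := fun i => (PySem.List.enumerate component 0).foldl (fun frag jc => PySem.List.pySetD frag jc.2 (PySem.Int.mod (PySem.Int.floordiv i ((2:Int) ^ (((component.length : Int)) - 1 - jc.1).toNat)) 2)) (PySem.List.pyRepeat [(0:Int)] (all_components.length : Int)))]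
    have hn1 : ¬ component.length < 1 := by omega
    rw [enumerate_binary_strings, if_neg hn1, pvBacktrack_eq]
    simp only [List.nil_append, List.map_map, List.nil_append]
    have hA : (pvAllBitsC component.length).map (fun binary_string => List.map pvCharInt binary_string) = pvAllBits component.length := pvAllBitsC_int component.length
    simp only [← List.map_map, List.map_id']
    rw [hA, pvAllBits_eq]
    have hcast : ((2:Int)^component.length) = ((2^component.length : Nat) : Int) := by push_cast; ring
    rw [hcast, PySem.List.pyRange_zero_natCast]
    simp only [List.map_map]
    apply List.map_congr_left
    intro i hi
    have hi' : i < 2^component.length := List.mem_range.mp hi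
    apply PySem.List.foldl_congr_mem
    intro acc p hp
    obtain ⟨k, hk, hpk⟩ := (PySem.List.mem_enumerate_iff component 0 p).mp hp
    subst hpk
    congr 1
    show ((PySem.List.pyGet? (pvNatBits component.length i) ((0:Int) + (k:Int))).getD 0) = _
    have hkn : (0:Int) + (k:Int) = ((k:Nat):Int) := by ring
    rw [hkn, PySem.List.pyGet?_natCast]
    have hlen : k < (pvNatBits component.length i).length := by rw [pvNatBits_length]; exact hk
    rw [List.getElem?_eq_getElem hlen]
    simp only [Option.getD_some]
    rw [pvNatBits_getElem component.length i k hk hi']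
    have htn : (((component.length):Int) - 1 - (k:Int)).toNat = component.length - 1 - k := by omega
    rw [htn]
    have h2 : ((2:Int))^(component.length-1-k) = ((2^(component.length-1-k):Nat):Int) := by push_cast; ring
    rw [h2, PySem.Int.floordiv_natCast]
    have hm := PySem.Int.mod_natCast (i / 2^(component.length-1-k)) 2
    simp only [Nat.cast_ofNat] at hm
    exact hm.symm
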